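-- pv_equiv track=rewrite | github.com/glinozem/wine-assistant | scripts/daily_import_ops.py | coalesce_xlsx_args
-- ===== SOURCE A (Python) =====
-- from typing import Any, Dict, List, Optional
--
-- def coalesce_xlsx_args(parts: List[str]) -> List[str]:
--     """
--     Склеивает argv-токены в имена файлов, которые заканчиваются на .xlsx.
--     Позволяет работать с 'неправильно' процитированными путями/именами
--     (например, когда имя с пробелами распалось на несколько аргументов).
--     """
--     out: List[str] = []
--     buf: List[str] = []
--
--     for part in parts or []:
--         if part is None:
--             continue
--         s = str(part).strip()
--         if not s:
--             continue
--
--         buf.append(s)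
--         if s.lower().endswith(".xlsx"):
--             out.append(" ".join(buf))
--             buf = []
--
--     if buf:
--         # Остались токены без завершающего .xlsx — это почти всегда ошибка квотинга
--         out.append(" ".join(buf))
--
--     return out
-- ===== SOURCE B (Python) =====
-- def coalesce_xlsx_args(parts):
--     # Right-to-left pass: build the groups back-to-front. A '.xlsx' token opens
--     # a new group; any other token attaches to the nearest group to its right
--     # (or starts the trailing markerless group if none exists yet).
--     # Groups and their tokens are collected in reverse order (O(1) appends)
--     # and reversed once at the end.
--     cleaned = [s for s in (str(p).strip() for p in (parts or []) if p is not None) if s]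
--     rev_groups = []  # rev_groups[-1] is the leftmost group; each group token-reversed
--     for s in reversed(cleaned):
--         if s.lower().endswith(".xlsx"):
--             rev_groups.append([s])
--         elif rev_groups:
--             rev_groups[-1].append(s)
--         else:
--             rev_groups.append([s])
--     return [" ".join(reversed(g)) for g in reversed(rev_groups)]
-- ===== Notes on version B (the rewrite author's own statement) =====
-- stated objective: alternative
-- what changed: Replaced A's left-to-right buffer-and-flush loop by a right-to-left pass that builds the groups back-to-front: a '.xlsx' token opens a new group, any other cleaned token attaches to the nearest group to its right (or to a trailing markerless group).
import Mathlib
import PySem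

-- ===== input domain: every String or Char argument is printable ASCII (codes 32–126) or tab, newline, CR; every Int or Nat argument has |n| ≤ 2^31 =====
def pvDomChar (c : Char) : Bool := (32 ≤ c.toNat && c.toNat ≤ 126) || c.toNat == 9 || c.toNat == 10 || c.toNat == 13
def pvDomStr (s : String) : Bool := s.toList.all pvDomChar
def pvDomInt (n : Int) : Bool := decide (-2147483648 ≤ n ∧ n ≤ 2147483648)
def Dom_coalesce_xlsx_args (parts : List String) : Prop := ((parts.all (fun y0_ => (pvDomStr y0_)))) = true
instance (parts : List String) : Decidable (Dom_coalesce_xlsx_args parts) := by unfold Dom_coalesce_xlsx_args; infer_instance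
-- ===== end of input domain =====

-- B replaces A's left-to-right buffer-and-flush loop by a right-to-left pass
-- building the groups back-to-front (alternative decomposition, same cost).

-- ===== PORT A =====
-- one buffering fold: accumulate stripped non-empty tokens in buf, flush on '.xlsx'
def coalesce_xlsx_args (parts : List String) : List String :=
  let res := parts.foldl
    (fun (st : List String × List String) (part : String) =>
      let s := PySem.Str.strip part
      if s = "" then st
      else
        let buf := st.2 ++ [s]
        if PySem.Str.endswith (PySem.Str.lower s) ".xlsx" then
          (st.1 ++ [PySem.Str.join " " buf], [])
        else (st.1, buf))
    ([], [])
  if res.2 ≠ [] then res.1 ++ [PySem.Str.join " " res.2] else res.1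

-- ===== PORT B =====
def pvIsMark (s : String) : Bool := PySem.Str.endswith (PySem.Str.lower s) ".xlsx"

-- Source B's reversed-iteration body: Source B keeps groups and their tokens in
-- reverse storage order (appends) and reverses once at the end; here both
-- reversals are fused into the traversal, so each append becomes a cons and
-- 'for s in reversed(cleaned)' becomes List.foldr (same step values)
def pvStepB (s : String) (groups : List (List String)) : List (List String) :=
  if pvIsMark s then [s] :: groups
  else
    match groups with
    | [] => [[s]]
    | g :: gs => (s :: g) :: gs

def coalesce_xlsx_args_alt (parts : List String) : List String :=
  let cleaned := parts.filterMap (fun p =>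
    let s := PySem.Str.strip p
    if s = "" then none else some s)
  (cleaned.foldr pvStepB []).map (PySem.Str.join " ")

-- ===== PRECONDITION & SPEC =====
def Spec_coalesce_xlsx_args (parts : List String) (out : List String) : Prop := out = coalesce_xlsx_args_alt parts
instance (parts : List String) (out : List String) : Decidable (Spec_coalesce_xlsx_args parts out) := by unfold Spec_coalesce_xlsx_args; infer_instance

-- ===== CLAIM (what is proved, stated in full; the proofs are below) =====
def Claim_equal_coalesce_xlsx_args : Prop := ∀ (parts : List String), Dom_coalesce_xlsx_args parts → Spec_coalesce_xlsx_args parts (coalesce_xlsx_args parts)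

-- ===== LEMMAS AND PROOFS =====

-- A's loop body, named for the proofs (definitionally the lambda in the port of A)
def pvStepA (st : List String × List String) (part : String) : List String × List String :=
  let s := PySem.Str.strip part
  if s = "" then st
  else
    let buf := st.2 ++ [s]
    if PySem.Str.endswith (PySem.Str.lower s) ".xlsx" then
      (st.1 ++ [PySem.Str.join " " buf], [])
    else (st.1, buf)

-- A's step restricted to an already-cleaned (stripped, non-empty) token
def pvStepC (st : List String × List String) (s : String) : List String × List String :=
  let buf := st.2 ++ [s]
  if pvIsMark s then (st.1 ++ [PySem.Str.join " " buf], []) else (st.1, buf)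

def pvClean (parts : List String) : List String :=
  parts.filterMap (fun p =>
    let s := PySem.Str.strip p
    if s = "" then none else some s)

def pvFinish (st : List String × List String) : List String :=
  if st.2 ≠ [] then st.1 ++ [PySem.Str.join " " st.2] else st.1

lemma foldA_eq_foldC (parts : List String) (st : List String × List String) :
    parts.foldl pvStepA st = (pvClean parts).foldl pvStepC st := by
  induction parts generalizing st with
  | nil => simp [pvClean]
  | cons p rest ih =>
    simp only [List.foldl_cons]
    by_cases h : PySem.Str.strip p = ""
    · rw [show pvClean (p :: rest) = pvClean rest from by simp [pvClean, h]]
      rw [← ih]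
      simp [pvStepA, h]
    · rw [show pvClean (p :: rest) = PySem.Str.strip p :: pvClean rest from
        by simp [pvClean, h]]
      simp only [List.foldl_cons]
      rw [show pvStepA st p = pvStepC st (PySem.Str.strip p) from
        by simp [pvStepA, pvStepC, pvIsMark, h]]
      exact ih _

-- non-marker tokens folded (from the right) into no group form one single group
lemma foldrB_nomark_nil (buf : List String)
    (hbuf : ∀ b ∈ buf, pvIsMark b = false) :
    buf.foldr pvStepB [] = if buf = [] then [] else [buf] := by
  induction buf with
  | nil => simp
  | cons b bs ih =>
    have hb : pvIsMark b = false := hbuf b (by simp)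
    rw [List.foldr_cons, ih (fun x hx => hbuf x (by simp [hx]))]
    rcases bs with _ | ⟨c, cs⟩ <;> simp [pvStepB, hb]

-- non-marker tokens folded onto an existing first group all prepend into it
lemma foldrB_nomark_cons (buf g : List String) (gs : List (List String))
    (hbuf : ∀ b ∈ buf, pvIsMark b = false) :
    buf.foldr pvStepB (g :: gs) = (buf ++ g) :: gs := by
  induction buf with
  | nil => simp
  | cons b bs ih =>
    have hb : pvIsMark b = false := hbuf b (by simp)
    rw [List.foldr_cons, ih (fun x hx => hbuf x (by simp [hx]))]
    simp [pvStepB, hb]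

-- main invariant: A's left fold with pending buffer buf equals B's right fold
-- with buf's tokens prepended to it
lemma foldC_eq_foldrB (l : List String) (out buf : List String)
    (hbuf : ∀ b ∈ buf, pvIsMark b = false) :
    pvFinish (l.foldl pvStepC (out, buf)) =
      out ++ (buf.foldr pvStepB (l.foldr pvStepB [])).map (PySem.Str.join " ") := by
  induction l generalizing out buf with
  | nil =>
    rw [List.foldr_nil, foldrB_nomark_nil buf hbuf]
    rcases buf with _ | ⟨b, bs⟩ <;> simp [pvFinish]
  | cons s rest ih =>
    by_cases hs : pvIsMark s = true
    · simp only [List.foldl_cons, pvStepC, hs, if_true]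
      rw [ih (out ++ [PySem.Str.join " " (buf ++ [s])]) [] (by simp),
          List.foldr_cons,
          show pvStepB s (rest.foldr pvStepB []) = [s] :: rest.foldr pvStepB []
            from by simp [pvStepB, hs],
          foldrB_nomark_cons buf [s] _ hbuf]
      simp
    · have hs' : pvIsMark s = false := by simpa using hs
      simp only [List.foldl_cons, pvStepC, hs', Bool.false_eq_true, if_false]
      rw [ih out (buf ++ [s])
          (by intro b hb; rcases List.mem_append.1 hb with h | h
              · exact hbuf b h
              · simp at h; subst h; exact hs')]
      congr 1
      rw [List.foldr_cons]
      rcases hfold : rest.foldr pvStepB [] with _ | ⟨g, gs⟩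
      · rw [show pvStepB s [] = [[s]] from by simp [pvStepB, hs'],
            foldrB_nomark_cons buf [s] [] hbuf,
            foldrB_nomark_nil (buf ++ [s])
              (by intro b hb; rcases List.mem_append.1 hb with h | h
                  · exact hbuf b h
                  · simp at h; subst h; exact hs')]
        simp
      · rw [show pvStepB s (g :: gs) = (s :: g) :: gs from by simp [pvStepB, hs'],
            foldrB_nomark_cons buf (s :: g) gs hbuf,
            foldrB_nomark_cons (buf ++ [s]) g gs
              (by intro b hb; rcases List.mem_append.1 hb with h | h
                  · exact hbuf b h
                  · simp at h; subst h; exact hs')]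
        simp

-- ===== VERDICT (by name: the statement is the Claim_ definition above) =====
theorem coalesce_xlsx_args_spec : Claim_equal_coalesce_xlsx_args := by
  intro parts _
  have hA : coalesce_xlsx_args parts = pvFinish (parts.foldl pvStepA ([], [])) := rfl
  have hB : coalesce_xlsx_args_alt parts =
      ((pvClean parts).foldr pvStepB []).map (PySem.Str.join " ") := rfl
  unfold Spec_coalesce_xlsx_args
  rw [hA, hB, foldA_eq_foldC,
      foldC_eq_foldrB (pvClean parts) [] [] (by simp)]
  simp
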